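-- pv_equiv track=rewrite | github.com/koba925/alds | atcoder/ABC150/D.py | semi_common_multiple
-- ===== SOURCE A (Python) =====
-- import math
-- from functools import reduce
--
-- def gcd(*A):
--     return reduce(math.gcd, A)
--
-- def lcm(*A):
--     return reduce(lambda acc, e: acc * e // gcd(acc, e), A)
--
-- def semi_common_multiple(N, M, A):
--     while A[0] % 2 == 0:
--         for i in range(N):
--             if A[i] % 2 != 0:
--                 return 0
--             A[i] //= 2
--         M //= 2
--
--     for i in range(N):
--         if A[i] % 2 == 0:
--             return 0
--
--     return (M // lcm(*A) + 1) // 2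
-- ===== SOURCE B (Python) =====
-- import math
--
-- def semi_common_multiple(N, M, A):
--     # 2-adic valuation of A[0]
--     v = 0
--     x = A[0]
--     while x and x % 2 == 0:
--         x //= 2
--         v += 1
--     d = 1 << v
--     # one pass: the first N entries must each be d times an odd number and are
--     # reduced by d; everything joins the running lcm
--     L = 1
--     k = N
--     for a in A:
--         if k > 0:
--             q, r = divmod(a, d)
--             if r or q % 2 == 0:
--                 return 0
--             a = q
--             k -= 1
--         L = L * a // math.gcd(L, a)
--     return ((M // d) // L + 1) // 2
-- ===== Notes on version B (the rewrite author's own statement) =====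
-- stated objective: faster
-- what changed: A repeatedly halves the whole array (and M) once per power of two and then re-scans it; B computes the 2-adic valuation v of A[0] once with one small loop, then makes a single pass over the list checking each of the first N entries is 2^v times an odd number while folding everything into one running lcm, returning ((M // 2^v) // lcm + 1) // 2; Pre_ excludes only inputs where A raises (empty list, IndexError past the end, ZeroDivisionError in lcm) or loops forever.
import Mathlib
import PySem

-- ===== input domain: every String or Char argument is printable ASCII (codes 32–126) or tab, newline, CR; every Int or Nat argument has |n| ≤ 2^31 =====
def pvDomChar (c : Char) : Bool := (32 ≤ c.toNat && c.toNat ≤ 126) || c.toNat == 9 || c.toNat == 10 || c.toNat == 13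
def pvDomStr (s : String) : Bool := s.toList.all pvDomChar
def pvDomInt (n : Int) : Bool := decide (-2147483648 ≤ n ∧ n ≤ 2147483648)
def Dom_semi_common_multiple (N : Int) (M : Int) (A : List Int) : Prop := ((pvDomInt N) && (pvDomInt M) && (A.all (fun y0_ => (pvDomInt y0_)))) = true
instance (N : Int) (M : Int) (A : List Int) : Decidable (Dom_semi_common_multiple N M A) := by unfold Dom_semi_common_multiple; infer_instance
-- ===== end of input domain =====

-- B replaces A's repeated halving of the whole array by one 2-adic-valuation loop plus a single
-- pass folding one running lcm; equivalence is about the RETURN value only — Python A halves the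
-- list A in place, B does not mutate it.

-- ===== PORT A =====
-- reduce(lambda acc, e: acc * e // gcd(acc, e), A)  (math.gcd = Int.gcd, nonnegative)
def pvLcmStep (acc e : Int) : Int := PySem.Int.floordiv (acc * e) ((Int.gcd acc e : Int))

-- lcm(*A); Python's reduce raises on an empty list (unreachable under Pre_), 0 is a placeholder
def pvLcmA : List Int → Int
  | [] => 0
  | a :: as => as.foldl pvLcmStep a

-- 'for i in range(N): if A[i] % 2 != 0: return 0; A[i] //= 2' — walks the lazy index range
-- (represented by its remaining count, range(N) having max(N,0) indices) alongside the list
-- being mutated (pre = already-halved prefix, reversed); none = 'return 0'.  The '[], _+1' row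
-- is Python's IndexError (N > len(A), unreachable under Pre_).
def pvInnerA : List Int → List Int → Nat → Option (List Int)
  | pre, rest, 0 => some (pre.reverse ++ rest)
  | pre, a :: as, n + 1 =>
      if PySem.Int.mod a 2 ≠ 0 then none
      else pvInnerA (PySem.Int.floordiv a 2 :: pre) as n
  | _, [], _ + 1 => none

-- second loop: 'for i in range(N): if A[i] % 2 == 0: return 0' — false = 'return 0'
def pvCheckOddA : List Int → Nat → Bool
  | _, 0 => true
  | a :: as, n + 1 => if PySem.Int.mod a 2 = 0 then false else pvCheckOddA as n
  | [], _ + 1 => true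

-- 'while A[0] % 2 == 0: …' — fuel-bounded for totality; on the admitted domain (|entries| ≤ 2^31,
-- a nonzero entry among the first N, or N ≤ 0 with A[0] odd) the Python loop runs at most 33
-- times, so fuel 100 is never exhausted.
def pvLoopA : Nat → Int → List Int → Int → Option (Int × List Int)
  | 0, _, _, _ => none
  | f + 1, M, A, N =>
    match PySem.List.pyGet? A 0 with
    | none => none  -- IndexError on A[0] (A = [], unreachable under Pre_)
    | some a0 =>
      if PySem.Int.mod a0 2 = 0 then
        match pvInnerA [] A N.toNat with
        | none => none
        | some A' => pvLoopA f (PySem.Int.floordiv M 2) A' N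
      else some (M, A)

def semi_common_multiple (N : Int) (M : Int) (A : List Int) : Int :=
  match pvLoopA 100 M A N with
  | none => 0
  | some (M', A') =>
    if pvCheckOddA A' N.toNat then
      PySem.Int.floordiv (PySem.Int.floordiv M' (pvLcmA A') + 1) 2
    else 0

-- ===== PORT B =====
-- 'while x and x % 2 == 0: x //= 2; v += 1' — the 2-adic valuation of A[0]
def pvCtzB (x : Int) : Nat :=
  if h : PySem.Int.mod x 2 ≠ 0 ∨ x = 0 then 0
  else 1 + pvCtzB (PySem.Int.floordiv x 2)
termination_by x.natAbs
decreasing_by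
  rw [not_or] at h
  obtain ⟨h2, hx⟩ := h
  rw [not_not, PySem.Int.mod_eq_zero_iff_dvd] at h2
  rw [PySem.Int.floordiv_eq_ediv_of_pos (by omega : (0:Int) < 2)]
  omega

-- 'for a in A: if k > 0: q, r = divmod(a, d); if r or q % 2 == 0: return 0; a = q; k -= 1;
--  L = L * a // math.gcd(L, a)' — single pass, k = entries still to validate, none = 'return 0'
def pvGoB (d : Int) : List Int → Int → Int → Option Int
  | [], _, L => some L
  | a :: as, k, L =>
    if 0 < k then
      let q := PySem.Int.floordiv a d
      let r := PySem.Int.mod a d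
      if r ≠ 0 ∨ PySem.Int.mod q 2 = 0 then none
      else pvGoB d as (k - 1) (PySem.Int.floordiv (L * q) ((Int.gcd L q : Int)))
    else pvGoB d as k (PySem.Int.floordiv (L * a) ((Int.gcd L a : Int)))

def semi_common_multiple_alt (N : Int) (M : Int) (A : List Int) : Int :=
  match PySem.List.pyGet? A 0 with
  | none => 0  -- IndexError on A[0] (A = [], unreachable under Pre_)
  | some a0 =>
    match pvGoB ((1 : Int) <<< pvCtzB a0) A N 1 with
    | none => 0
    | some L =>
      PySem.Int.floordiv
        (PySem.Int.floordiv (PySem.Int.floordiv M ((1 : Int) <<< pvCtzB a0)) L + 1) 2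

-- ===== PRECONDITION & SPEC =====
-- Pre_ excludes exactly the inputs where Python A does not return normally: the empty list
-- (IndexError); N > len(A) with no parity mismatch to stop the scan before it runs off the end
-- (IndexError); non-terminating loops (the first N entries all zero, or N ≤ 0 with A[0] even);
-- and the inputs where A raises ZeroDivisionError in lcm — its parity checks pass (every one of
-- the first N entries nonzero with the same lowest set bit, i.e. the same 2-adic valuation as
-- A[0]) while a zero remains in the part of the list the lcm still reads.
def Pre_semi_common_multiple (N : Int) (M : Int) (A : List Int) : Prop :=
  A ≠ [] ∧
  ((1 ≤ N ∧ N ≤ (A.length : Int) ∧ ∃ x ∈ A.take N.toNat, x ≠ 0) ∨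
   (N ≤ 0 ∧ PySem.Int.mod (A.headD 0) 2 ≠ 0) ∨
   ((A.length : Int) < N ∧ ∃ x ∈ A, PySem.Int.mod x 2 ≠ PySem.Int.mod (A.headD 0) 2)) ∧
  ¬((∀ x ∈ A.take (max N 0).toNat, x ≠ 0 ∧
      PySem.Int.band x (-x) = PySem.Int.band (A.headD 1) (-(A.headD 1))) ∧
    (0 : Int) ∈ A.drop (max N 0).toNat)
instance (N : Int) (M : Int) (A : List Int) : Decidable (Pre_semi_common_multiple N M A) := by
  unfold Pre_semi_common_multiple; infer_instance

def pvWitness_semi_common_multiple : Int × Int × List Int := (2, 10, [2, 6])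

def Spec_semi_common_multiple (N : Int) (M : Int) (A : List Int) (out : Int) : Prop := out = semi_common_multiple_alt N M A
instance (N : Int) (M : Int) (A : List Int) (out : Int) : Decidable (Spec_semi_common_multiple N M A out) := by unfold Spec_semi_common_multiple; infer_instance

-- ===== CLAIM (what is proved, stated in full; the proofs are below) =====
def Claim_equal_semi_common_multiple : Prop := ∀ (N : Int) (M : Int) (A : List Int), Dom_semi_common_multiple N M A → Pre_semi_common_multiple N M A → Spec_semi_common_multiple N M A (semi_common_multiple N M A)

-- ===== LEMMAS AND PROOFS =====

theorem pv_witness_ok :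
    Dom_semi_common_multiple pvWitness_semi_common_multiple.1 pvWitness_semi_common_multiple.2.1 pvWitness_semi_common_multiple.2.2 ∧
    Pre_semi_common_multiple pvWitness_semi_common_multiple.1 pvWitness_semi_common_multiple.2.1 pvWitness_semi_common_multiple.2.2 := by
  decide

-- proof-only helper: B's pass restricted to the entries it validates (k > 0 throughout)
def pvChk (d : Int) : List Int → Int → Option Int
  | [], L => some L
  | a :: as, L =>
    let q := PySem.Int.floordiv a d
    let r := PySem.Int.mod a d
    if r ≠ 0 ∨ PySem.Int.mod q 2 = 0 then none
    else pvChk d as (PySem.Int.floordiv (L * q) ((Int.gcd L q : Int)))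

-- B's single pass = validate the first k entries, then fold the rest into the lcm
theorem pvGoB_split (d : Int) : ∀ (xs : List Int) (k L : Int),
    pvGoB d xs k L =
      match pvChk d (xs.take k.toNat) L with
      | none => none
      | some L' => some ((xs.drop k.toNat).foldl pvLcmStep L') := by
  intro xs
  induction xs with
  | nil => intro k L; simp [pvGoB, pvChk]
  | cons a as ih =>
    intro k L
    by_cases hk : 0 < k
    · obtain ⟨m, hm⟩ : ∃ m, k.toNat = m + 1 := ⟨k.toNat - 1, by omega⟩
      have hm' : (k - 1).toNat = m := by omega
      rw [hm, List.take_succ_cons, List.drop_succ_cons]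
      simp only [pvGoB, pvChk, if_pos hk]
      split
      · rfl
      · rw [ih (k - 1) _, hm']
    · have h0 : k.toNat = 0 := by omega
      rw [h0, List.take_zero, List.drop_zero]
      simp only [pvGoB, if_neg hk, pvChk]
      rw [ih k _, h0, List.take_zero, List.drop_zero]
      simp [pvChk, pvLcmStep]

-- the inner for-loop, processing as many positions as there are indices
theorem pvInnerA_eq (rest : List Int) : ∀ (n : Nat) (pre : List Int), n ≤ rest.length →
    pvInnerA pre rest n =
      if (rest.take n).all (fun a => PySem.Int.mod a 2 = 0) then
        some (pre.reverse ++ (rest.take n).map (fun a => PySem.Int.floordiv a 2) ++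
          rest.drop n)
      else none := by
  induction rest with
  | nil =>
    intro n pre h
    cases n with
    | zero => simp [pvInnerA]
    | succ n => simp at h
  | cons a as ih =>
    intro n pre h
    cases n with
    | zero => simp [pvInnerA]
    | succ n =>
      simp only [List.length_cons, Nat.add_le_add_iff_right] at h
      simp only [pvInnerA, List.take_succ_cons, List.drop_succ_cons,
        List.all_cons, List.map_cons]
      by_cases ha : PySem.Int.mod a 2 = 0
      · rw [if_neg (not_not_intro ha), ih n _ h]
        by_cases hall : (as.take n).all (fun a => PySem.Int.mod a 2 = 0)
        · rw [if_pos hall, if_pos (Bool.and_eq_true_iff.mpr ⟨decide_eq_true ha, hall⟩)]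
          simp
        · rw [if_neg hall, if_neg (fun hc => hall (Bool.and_eq_true_iff.mp hc).2)]
      · rw [if_pos ha, if_neg (fun hc => ha (of_decide_eq_true (Bool.and_eq_true_iff.mp hc).1))]

-- the second for-loop: true iff the first n elements are all odd
theorem pvCheckOddA_eq (rest : List Int) : ∀ (n : Nat),
    pvCheckOddA rest n = (rest.take n).all (fun a => PySem.Int.mod a 2 ≠ 0) := by
  induction rest with
  | nil => intro n; cases n <;> simp [pvCheckOddA]
  | cons a as ih =>
    intro n
    cases n with
    | zero => simp [pvCheckOddA]
    | succ n =>
      simp only [pvCheckOddA, List.take_succ_cons, List.all_cons]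
      by_cases ha : PySem.Int.mod a 2 = 0
      · rw [if_pos ha,
          show decide (PySem.Int.mod a 2 ≠ 0) = false from decide_eq_false (not_not_intro ha)]
        simp
      · rw [if_neg ha, ih n, show decide (PySem.Int.mod a 2 ≠ 0) = true from decide_eq_true ha]
        simp

-- pvChk with an even divisor rejects as soon as it meets an odd element
theorem pvChk_none_of_odd (d : Int) (hd : 2 ∣ d) :
    ∀ (xs : List Int) (L : Int), (∃ a ∈ xs, ¬ 2 ∣ a) → pvChk d xs L = none := by
  intro xs
  induction xs with
  | nil => intro L hex; obtain ⟨a, ha, _⟩ := hex; simp at ha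
  | cons b bs ih =>
    intro L hex
    obtain ⟨a, ha, haodd⟩ := hex
    simp only [pvChk]
    by_cases hb : 2 ∣ b
    · have hbne : a ≠ b := fun h => haodd (h ▸ hb)
      have hmem : a ∈ bs := by
        rcases List.mem_cons.mp ha with h | h
        · exact absurd h hbne
        · exact h
      split
      · rfl
      · exact ih _ ⟨a, hmem, haodd⟩
    · have hr : PySem.Int.mod b d ≠ 0 := by
        intro h
        rw [PySem.Int.mod_eq_zero_iff_dvd] at h
        exact hb (dvd_trans hd h)
      rw [if_pos (Or.inl hr)]

-- pvChk with a list starting with 0 and divisor 1 rejects at once (q = 0 is even)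
theorem pvChk_zero_head (as : List Int) (L : Int) : pvChk 1 ((0 : Int) :: as) L = none := by
  simp only [pvChk]
  rw [if_pos (Or.inr (by decide))]

-- pvChk with divisor 1: check everything odd, fold the lcm
theorem pvChk_one (xs : List Int) : ∀ (L : Int),
    pvChk 1 xs L =
      if xs.all (fun a => PySem.Int.mod a 2 ≠ 0) then some (xs.foldl pvLcmStep L) else none := by
  induction xs with
  | nil => intro L; simp [pvChk]
  | cons a as ih =>
    intro L
    simp only [pvChk, List.all_cons, List.foldl_cons]
    have h1 : PySem.Int.mod a 1 = 0 := by simp [PySem.Int.mod]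
    have h2 : PySem.Int.floordiv a 1 = a := by simp [PySem.Int.floordiv]
    rw [h1, h2]
    by_cases ha : PySem.Int.mod a 2 = 0
    · rw [if_pos (Or.inr ha),
        if_neg (fun hc => absurd ha (of_decide_eq_true (Bool.and_eq_true_iff.mp hc).1))]
    · rw [if_neg (fun hc => hc.elim (fun h0 => absurd rfl h0) ha), ih]
      by_cases hall : as.all (fun a => PySem.Int.mod a 2 ≠ 0)
      · rw [if_pos hall, if_pos (Bool.and_eq_true_iff.mpr ⟨decide_eq_true ha, hall⟩)]
        rfl
      · rw [if_neg hall, if_neg (fun hc => hall (Bool.and_eq_true_iff.mp hc).2)]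

-- halving every element together with the divisor leaves pvChk unchanged
theorem pvChk_halve (d : Int) (hd : 0 < d) : ∀ (xs : List Int) (L : Int), (∀ a ∈ xs, 2 ∣ a) →
    pvChk (2 * d) xs L = pvChk d (xs.map (fun a => PySem.Int.floordiv a 2)) L := by
  intro xs
  induction xs with
  | nil => intro L _; simp [pvChk]
  | cons a as ih =>
    intro L hall
    obtain ⟨m, hm⟩ := hall a List.mem_cons_self
    have hhalve : PySem.Int.floordiv a 2 = m := by
      rw [PySem.Int.floordiv_eq_ediv_of_pos (by omega : (0:Int) < 2)]; omega
    have hq : PySem.Int.floordiv a (2 * d) = PySem.Int.floordiv m d := by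
      rw [PySem.Int.floordiv_eq_ediv_of_pos (by omega : (0:Int) < 2 * d),
        PySem.Int.floordiv_eq_ediv_of_pos hd, hm]
      exact Int.mul_ediv_mul_of_pos m d (by omega)
    have hr : PySem.Int.mod a (2 * d) = 2 * PySem.Int.mod m d := by
      rw [PySem.Int.mod_eq_emod_of_pos (by omega : (0:Int) < 2 * d),
        PySem.Int.mod_eq_emod_of_pos hd, hm]
      exact Int.mul_emod_mul_of_pos m d (by omega)
    simp only [List.map_cons, pvChk, hq, hr, hhalve]
    by_cases hr0 : PySem.Int.mod m d = 0
    · by_cases hq2 : PySem.Int.mod (PySem.Int.floordiv m d) 2 = 0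
      · rw [if_pos (Or.inr hq2), if_pos (Or.inr hq2)]
      · rw [if_neg (fun hc => hc.elim (fun h0 => h0 (by rw [hr0]; ring)) hq2),
          if_neg (fun hc => hc.elim (fun h0 => h0 hr0) hq2)]
        exact ih _ (fun x hx => hall x (List.mem_cons_of_mem a hx))
    · rw [if_pos (Or.inl (fun h0 => hr0 (by omega))), if_pos (Or.inl hr0)]

-- (1 : Int) <<< n is 2 ^ n
theorem pvShift (n : Nat) : (1 : Int) <<< n = 2 ^ n := by simp [Int.shiftLeft_eq]

-- unfolding pvCtzB once on an even nonzero argument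
theorem pvCtzB_even (x : Int) (hx : x ≠ 0) (he : PySem.Int.mod x 2 = 0) :
    pvCtzB x = 1 + pvCtzB (PySem.Int.floordiv x 2) := by
  rw [pvCtzB, dif_neg (fun hor => hor.elim (fun h => h he) (fun h => hx h))]

-- the fold of pvLcmStep over the whole list, started at 1, is Python's lcm(*A)
theorem pvFold_lcmA (a0 : Int) (as : List Int) :
    (a0 :: as).foldl pvLcmStep 1 = pvLcmA (a0 :: as) := by
  have hstep : pvLcmStep 1 a0 = a0 := by
    simp [pvLcmStep, Int.one_gcd, PySem.Int.floordiv]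
  rw [List.foldl_cons, hstep]
  rfl

-- B is invariant under halving M and the first N entries (when those are all even)
theorem pvB_halve (M N : Int) (A : List Int) (hN : 1 ≤ N) (hlen : N ≤ (A.length : Int))
    (hall : ∀ x ∈ A.take N.toNat, (2:Int) ∣ x) (hne : A ≠ []) :
    semi_common_multiple_alt N M A =
      semi_common_multiple_alt N (PySem.Int.floordiv M 2)
        ((A.take N.toNat).map (fun a => PySem.Int.floordiv a 2) ++ A.drop N.toNat) := by
  obtain ⟨a0, as, rfl⟩ := List.exists_cons_of_ne_nil hne
  obtain ⟨m, hnm⟩ : ∃ m, N.toNat = m + 1 := ⟨N.toNat - 1, by omega⟩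
  rw [hnm, List.take_succ_cons, List.drop_succ_cons]
  have h2 : (2:Int) ∣ a0 := by
    apply hall a0
    rw [hnm, List.take_succ_cons]
    exact List.mem_cons_self
  obtain ⟨w, hw⟩ := h2
  have hhalve : PySem.Int.floordiv a0 2 = w := by
    rw [PySem.Int.floordiv_eq_ediv_of_pos (by omega : (0:Int) < 2)]; omega
  have hm2 : m ≤ as.length := by
    simp only [List.length_cons] at hlen
    omega
  have hlenmap : ((as.take m).map (fun a => PySem.Int.floordiv a 2)).length = m := by
    simp only [List.length_map, List.length_take]; omega
  simp only [List.map_cons, List.cons_append, semi_common_multiple_alt,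
    PySem.List.pyGet?_zero_cons, hhalve]
  rw [pvGoB_split, pvGoB_split, hnm, List.take_succ_cons, List.drop_succ_cons,
    List.take_succ_cons, List.drop_succ_cons,
    List.take_left' hlenmap, List.drop_left' hlenmap]
  by_cases h0 : a0 = 0
  · have hw0 : w = 0 := by omega
    subst h0; subst hw0
    have hctz0 : pvCtzB 0 = 0 := by rw [pvCtzB, dif_pos (Or.inr rfl)]
    have hd1 : ((1 : Int) <<< pvCtzB 0) = 1 := by rw [hctz0, pvShift, pow_zero]
    rw [hd1, pvChk_zero_head, pvChk_zero_head]
  · have hmod : PySem.Int.mod a0 2 = 0 := by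
      rw [PySem.Int.mod_eq_zero_iff_dvd]; exact ⟨w, hw⟩
    have hctz : pvCtzB a0 = 1 + pvCtzB w := by rw [pvCtzB_even a0 h0 hmod, hhalve]
    rw [hctz, pvShift, pvShift]
    have hpow : (2:Int) ^ (1 + pvCtzB w) = 2 * 2 ^ pvCtzB w := by
      rw [pow_add, pow_one]
    have hmapeq : (w :: (as.take m).map (fun a => PySem.Int.floordiv a 2))
        = ((a0 :: as.take m).map (fun a => PySem.Int.floordiv a 2)) := by
      simp [← hhalve]
    rw [hpow, hmapeq,
      ← pvChk_halve (2 ^ pvCtzB w) (by positivity) (a0 :: as.take m) 1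
        (fun x hx => hall x (by rw [hnm, List.take_succ_cons]; exact hx))]
    have hM : PySem.Int.floordiv (PySem.Int.floordiv M 2) (2 ^ pvCtzB w) =
        PySem.Int.floordiv M (2 * 2 ^ pvCtzB w) := by
      rw [PySem.Int.floordiv_eq_ediv_of_pos (by omega : (0:Int) < 2),
        PySem.Int.floordiv_eq_ediv_of_pos (by positivity : (0:Int) < 2 ^ pvCtzB w),
        PySem.Int.floordiv_eq_ediv_of_pos (by positivity : (0:Int) < 2 * 2 ^ pvCtzB w)]
      exact Int.ediv_ediv_of_nonneg (by omega)
    rw [hM]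

-- one unfolding of the while loop when A[0] is even: run the inner loop and recurse
theorem pvLoopA_even_step (f : Nat) (M N a0 : Int) (as : List Int)
    (he : PySem.Int.mod a0 2 = 0) :
    pvLoopA (f + 1) M (a0 :: as) N =
      match pvInnerA [] (a0 :: as) N.toNat with
      | none => none
      | some A' => pvLoopA f (PySem.Int.floordiv M 2) A' N := by
  simp only [pvLoopA, PySem.List.pyGet?_zero_cons]
  rw [if_pos he]

-- one unfolding of the while loop when A[0] is odd: it exits immediately
theorem pvLoopA_odd (f : Nat) (M N a0 : Int) (as : List Int)
    (hodd : PySem.Int.mod a0 2 ≠ 0) :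
    pvLoopA (f + 1) M (a0 :: as) N = some (M, a0 :: as) := by
  simp only [pvLoopA, PySem.List.pyGet?_zero_cons]
  rw [if_neg hodd]

-- the N ≤ 0 case: A's loops do nothing, B's pass validates nothing; both reduce to
-- (M // lcm(*A) + 1) // 2
theorem pv_nonpos (N M : Int) (A : List Int) (hN : N ≤ 0) (hne : A ≠ [])
    (hodd : PySem.Int.mod (A.headD 0) 2 ≠ 0) :
    semi_common_multiple N M A = semi_common_multiple_alt N M A := by
  obtain ⟨a0, as, rfl⟩ := List.exists_cons_of_ne_nil hne
  simp only [List.headD_cons] at hodd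
  have hn0 : N.toNat = 0 := by omega
  unfold semi_common_multiple semi_common_multiple_alt
  rw [show (100:Nat) = 99 + 1 from rfl, pvLoopA_odd 99 M N a0 as hodd, hn0]
  dsimp only
  have hctz : pvCtzB a0 = 0 := by rw [pvCtzB, dif_pos (Or.inl hodd)]
  have hd1 : ((1 : Int) <<< pvCtzB a0) = 1 := by rw [hctz, pvShift, pow_zero]
  rw [PySem.List.pyGet?_zero_cons]
  dsimp only
  rw [hd1, pvGoB_split, hn0, List.take_zero, List.drop_zero]
  simp only [pvChk, pvCheckOddA, pvFold_lcmA]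
  have hM1 : PySem.Int.floordiv M 1 = M := by simp [PySem.Int.floordiv]
  rw [if_pos trivial, hM1]

-- main simulation for 1 ≤ N: A's fuel-bounded loop plus post-processing equals B, as long as
-- the fuel exceeds a 2-adic valuation bound k of some nonzero entry among the first N
theorem pvLoop_main : ∀ (k f : Nat) (M N : Int) (A : List Int), k < f → A ≠ [] → 1 ≤ N →
    N ≤ (A.length : Int) → (∃ x ∈ A.take N.toNat, x ≠ 0 ∧ x.natAbs < 2 ^ k) →
    (match pvLoopA f M A N with
     | none => 0
     | some (M', A') =>
       if pvCheckOddA A' N.toNat then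
         PySem.Int.floordiv (PySem.Int.floordiv M' (pvLcmA A') + 1) 2
       else 0)
    = semi_common_multiple_alt N M A := by
  intro k
  induction k with
  | zero =>
    intro f M N A _ _ _ _ hex
    obtain ⟨x, _, hx0, hlt⟩ := hex
    simp at hlt
    omega
  | succ k ih =>
    intro f M N A hkf hne hN1 hlen hex
    obtain ⟨x, hxA, hx0, hlt⟩ := hex
    obtain ⟨f', rfl⟩ : ∃ f', f = f' + 1 := ⟨f - 1, by omega⟩
    obtain ⟨a0, as, rfl⟩ := List.exists_cons_of_ne_nil hne
    obtain ⟨m, hnm⟩ : ∃ m, N.toNat = m + 1 := ⟨N.toNat - 1, by omega⟩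
    have ha0mem : a0 ∈ (a0 :: as).take N.toNat := by
      rw [hnm, List.take_succ_cons]; exact List.mem_cons_self
    have hlenn : N.toNat ≤ as.length + 1 := by
      simp only [List.length_cons] at hlen
      omega
    simp only [pvLoopA, PySem.List.pyGet?_zero_cons]
    by_cases he : PySem.Int.mod a0 2 = 0
    · rw [if_pos he, pvInnerA_eq _ N.toNat [] (by simp only [List.length_cons]; omega)]
      by_cases hall : ((a0 :: as).take N.toNat).all (fun a => PySem.Int.mod a 2 = 0)
      · -- the first N entries are all even: one halving step on both sides
        rw [if_pos hall]
        simp only [List.reverse_nil, List.nil_append]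
        have halld : ∀ y ∈ (a0 :: as).take N.toNat, (2:Int) ∣ y := by
          intro y hy
          rw [← PySem.Int.mod_eq_zero_iff_dvd]
          exact of_decide_eq_true (List.all_eq_true.mp hall y hy)
        obtain ⟨mx, hmx⟩ := halld x hxA
        have hmaps : PySem.Int.floordiv x 2 = mx := by
          rw [PySem.Int.floordiv_eq_ediv_of_pos (by omega : (0:Int) < 2)]; omega
        set A' := ((a0 :: as).take N.toNat).map (fun a => PySem.Int.floordiv a 2) ++
          (a0 :: as).drop N.toNat with hA'
        have htk : ((a0 :: as).take N.toNat).length = N.toNat := by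
          simp only [List.length_take, List.length_cons]
          omega
        have hlen' : N ≤ (A'.length : Int) := by
          rw [hA']
          simp only [List.length_append, List.length_map, List.length_take, List.length_drop,
            List.length_cons]
          omega
        have hne' : A' ≠ [] := by
          rw [hA']
          intro hc
          have hc2 := congrArg List.length hc
          simp only [List.length_append, List.length_map, List.length_take, List.length_drop,
            List.length_cons, List.length_nil] at hc2
          omega
        have htake' : A'.take N.toNat =
            ((a0 :: as).take N.toNat).map (fun a => PySem.Int.floordiv a 2) := by
          rw [hA']
          apply List.take_left'
          simp only [List.length_map, List.length_take, List.length_cons]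
          omega
        have hwit : ∃ y ∈ A'.take N.toNat, y ≠ 0 ∧ y.natAbs < 2 ^ k := by
          refine ⟨PySem.Int.floordiv x 2, ?_, ?_⟩
          · rw [htake']
            exact List.mem_map_of_mem hxA
          · rw [hmaps]
            constructor
            · omega
            · have : (2:Nat) ^ (k + 1) = 2 * 2 ^ k := by ring
              omega
        have ihres := ih f' (PySem.Int.floordiv M 2) N A' (by omega) hne' hN1 hlen' hwit
        rw [ihres, ← pvB_halve M N (a0 :: as) hN1 hlen halld (List.cons_ne_nil a0 as)]
      · -- some entry among the first N is odd while A[0] is even: both sides return 0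
        rw [if_neg hall]
        have hex2 : ∃ y ∈ (a0 :: as).take N.toNat, ¬ (2:Int) ∣ y := by
          by_contra hcon
          push_neg at hcon
          exact hall (List.all_eq_true.mpr fun y hy =>
            decide_eq_true ((PySem.Int.mod_eq_zero_iff_dvd y 2).mpr (hcon y hy)))
        simp only [semi_common_multiple_alt, PySem.List.pyGet?_zero_cons]
        rw [pvGoB_split, hnm, List.take_succ_cons]
        by_cases h0 : a0 = 0
        · have hctz0 : pvCtzB a0 = 0 := by
            rw [h0, pvCtzB, dif_pos (Or.inr rfl)]
          have hd1 : ((1 : Int) <<< pvCtzB a0) = 1 := by rw [hctz0, pvShift, pow_zero]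
          rw [hd1, h0, pvChk_zero_head]
        · have hctz : pvCtzB a0 = 1 + pvCtzB (PySem.Int.floordiv a0 2) := pvCtzB_even a0 h0 he
          have hdvd : (2:Int) ∣ (1 : Int) <<< pvCtzB a0 := by
            rw [pvShift, hctz, pow_add, pow_one]
            exact Dvd.intro _ rfl
          rw [pvChk_none_of_odd _ hdvd _ 1 (by rw [← List.take_succ_cons, ← hnm]; exact hex2)]
    · -- A[0] odd: the loop stops; both sides post-process identically
      rw [if_neg he]
      dsimp only
      rw [pvCheckOddA_eq]
      simp only [semi_common_multiple_alt, PySem.List.pyGet?_zero_cons]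
      have hctz : pvCtzB a0 = 0 := by rw [pvCtzB, dif_pos (Or.inl he)]
      have hd1 : ((1 : Int) <<< pvCtzB a0) = 1 := by rw [hctz, pvShift, pow_zero]
      rw [hd1, pvGoB_split, pvChk_one]
      by_cases hallo : ((a0 :: as).take N.toNat).all (fun a => PySem.Int.mod a 2 ≠ 0)
      · rw [if_pos hallo, if_pos hallo]
        have hM1 : PySem.Int.floordiv M 1 = M := by simp [PySem.Int.floordiv]
        rw [hM1]
        dsimp only
        rw [← List.foldl_append, List.take_append_drop, pvFold_lcmA]
      · rw [if_neg hallo, if_neg hallo]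

-- the first loop returns 0 as soon as it meets an odd entry within its index budget
theorem pvInnerA_none : ∀ (rest : List Int), (∃ x ∈ rest, PySem.Int.mod x 2 ≠ 0) →
    ∀ (n : Nat) (pre : List Int), rest.length ≤ n → pvInnerA pre rest n = none := by
  intro rest
  induction rest with
  | nil => intro hex; obtain ⟨x, hx, _⟩ := hex; simp at hx
  | cons a as ih =>
    intro hex n pre hn
    obtain ⟨x, hx, hxodd⟩ := hex
    obtain ⟨n', rfl⟩ : ∃ n', n = n' + 1 := ⟨n - 1, by simp at hn; omega⟩
    simp only [pvInnerA]
    by_cases ha : PySem.Int.mod a 2 = 0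
    · rw [if_neg (not_not_intro ha)]
      have hmem : x ∈ as := by
        rcases List.mem_cons.mp hx with h | h
        · exact absurd (h ▸ hxodd) (not_not_intro ha)
        · exact h
      exact ih ⟨x, hmem, hxodd⟩ n' _ (by simp at hn; omega)
    · rw [if_pos ha]

-- the N > len(A) case on which A still returns: a parity mismatch with A[0] stops either loop
-- with 'return 0' before the out-of-range index is reached, and B returns 0 on the same mismatch
theorem pv_overrun (N M : Int) (A : List Int) (hne : A ≠ []) (hlen : (A.length : Int) < N)
    (hmix : ∃ x ∈ A, PySem.Int.mod x 2 ≠ PySem.Int.mod (A.headD 0) 2) :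
    semi_common_multiple N M A = semi_common_multiple_alt N M A := by
  obtain ⟨a0, as, rfl⟩ := List.exists_cons_of_ne_nil hne
  simp only [List.headD_cons] at hmix
  obtain ⟨x, hx, hxp⟩ := hmix
  have hlenn : (a0 :: as).length ≤ N.toNat := by
    simp only [List.length_cons] at hlen ⊢
    omega
  have htk : (a0 :: as).take N.toNat = a0 :: as := List.take_of_length_le hlenn
  have hdr : (a0 :: as).drop N.toNat = [] := List.drop_of_length_le hlenn
  by_cases he : PySem.Int.mod a0 2 = 0
  · -- A[0] even, some entry odd: the first loop hits it
    rw [he] at hxp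
    unfold semi_common_multiple semi_common_multiple_alt
    rw [show (100:Nat) = 99 + 1 from rfl, pvLoopA_even_step 99 M N a0 as he,
      pvInnerA_none (a0 :: as) ⟨x, hx, hxp⟩ N.toNat [] hlenn]
    dsimp only
    rw [PySem.List.pyGet?_zero_cons]
    dsimp only
    rw [pvGoB_split, htk]
    by_cases h0 : a0 = 0
    · have hctz0 : pvCtzB a0 = 0 := by rw [h0, pvCtzB, dif_pos (Or.inr rfl)]
      have hd1 : ((1 : Int) <<< pvCtzB a0) = 1 := by rw [hctz0, pvShift, pow_zero]
      rw [hd1, h0, pvChk_zero_head]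
    · have hctz : pvCtzB a0 = 1 + pvCtzB (PySem.Int.floordiv a0 2) := pvCtzB_even a0 h0 he
      have hdvd : (2:Int) ∣ (1 : Int) <<< pvCtzB a0 := by
        rw [pvShift, hctz, pow_add, pow_one]
        exact Dvd.intro _ rfl
      rw [pvChk_none_of_odd _ hdvd _ 1
        ⟨x, hx, fun hd => hxp ((PySem.Int.mod_eq_zero_iff_dvd x 2).mpr hd)⟩]
  · -- A[0] odd, some entry even: the second loop (and B's single pass) hits it
    have hxe : PySem.Int.mod x 2 = 0 := by
      have h1 := PySem.Int.mod_nonneg x (by omega : (0:Int) < 2)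
      have h2 := PySem.Int.mod_lt x (by omega : (0:Int) < 2)
      have h3 := PySem.Int.mod_nonneg a0 (by omega : (0:Int) < 2)
      have h4 := PySem.Int.mod_lt a0 (by omega : (0:Int) < 2)
      omega
    unfold semi_common_multiple semi_common_multiple_alt
    rw [show (100:Nat) = 99 + 1 from rfl, pvLoopA_odd 99 M N a0 as he]
    dsimp only
    have hnall : ¬ ((a0 :: as).all (fun a => PySem.Int.mod a 2 ≠ 0) = true) := by
      intro hc
      have hxc := List.all_eq_true.mp hc x hx
      simp only [decide_eq_true_eq] at hxc
      exact hxc hxe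
    rw [pvCheckOddA_eq, htk, if_neg hnall, PySem.List.pyGet?_zero_cons]
    dsimp only
    have hctz : pvCtzB a0 = 0 := by rw [pvCtzB, dif_pos (Or.inl he)]
    have hd1 : ((1 : Int) <<< pvCtzB a0) = 1 := by rw [hctz, pvShift, pow_zero]
    rw [hd1, pvGoB_split, htk, pvChk_one, if_neg hnall]

-- ===== VERDICT (by name: the statement is the Claim_ definition above) =====
theorem semi_common_multiple_spec : Claim_equal_semi_common_multiple := by
  intro N M A hdom hpre
  obtain ⟨hne, hdisj, _⟩ := hpre
  unfold Spec_semi_common_multiple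
  rcases hdisj with ⟨hN1, hlen, x, hx, hx0⟩ | ⟨hN0, hodd⟩ | ⟨hlen, hmix⟩
  · have hbound : x.natAbs < 2 ^ 32 := by
      unfold Dom_semi_common_multiple at hdom
      simp only [Bool.and_eq_true, List.all_eq_true] at hdom
      have hb := hdom.2 x (List.mem_of_mem_take hx)
      simp only [pvDomInt, decide_eq_true_eq] at hb
      have h32 : (2:Nat) ^ 32 = 2 * 2 ^ 31 := by norm_num
      have h31 : (2:Nat) ^ 31 = 2147483648 := by norm_num
      omega
    exact pvLoop_main 32 100 M N A (by omega) hne hN1 hlen ⟨x, hx, hx0, hbound⟩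
  · exact pv_nonpos N M A hN0 hne hodd
  · exact pv_overrun N M A hne hlen hmix
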